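-- pv_equiv track=rewrite | github.com/ppinppini/codingTest | 프로그래머스/0/120585. 머쓱이보다 키 큰 사람/머쓱이보다 키 큰 사람.py | solution
-- ===== SOURCE A (Python) =====
-- def solution(array, height):
--     answer = 0
--
--     for i in array:
--         if height < i:
--             answer = answer + 1
--         else:
--             answer = 0
--
--     return answer
-- ===== SOURCE B (Python) =====
-- def solution(array, height):
--     answer = 0
--     for i in reversed(array):
--         if height < i:
--             answer += 1
--         else:
--             break
--     return answer
-- ===== Notes on version B (the rewrite author's own statement) =====
-- stated objective: alternative
-- what changed: B scans the array backwards counting the trailing run of elements taller than height and breaks at the first non-taller element, instead of A's full forward scan with a reset-to-zero accumulator.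
import Mathlib
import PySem

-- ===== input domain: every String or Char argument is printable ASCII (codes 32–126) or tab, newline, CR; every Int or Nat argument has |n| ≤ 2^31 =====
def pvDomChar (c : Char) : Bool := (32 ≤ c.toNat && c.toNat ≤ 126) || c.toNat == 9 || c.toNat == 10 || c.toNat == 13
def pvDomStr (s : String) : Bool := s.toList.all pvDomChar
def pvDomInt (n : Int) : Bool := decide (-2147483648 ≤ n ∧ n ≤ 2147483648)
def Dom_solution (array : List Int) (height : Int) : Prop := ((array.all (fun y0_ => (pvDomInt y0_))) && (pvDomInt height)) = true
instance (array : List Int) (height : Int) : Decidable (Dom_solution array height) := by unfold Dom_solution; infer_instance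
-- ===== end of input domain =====

-- B scans backwards with early break; A scans forwards resetting the counter: same value, different traversal.
-- ===== PORT A =====
def solution (array : List Int) (height : Int) : Int :=
  array.foldl (fun answer i => if height < i then answer + 1 else 0) 0

-- ===== PORT B =====
-- backward scan with break: stops at the first element not taller than height
def solutionAltGo (height : Int) : List Int → Int
  | [] => 0
  | i :: rest => if height < i then solutionAltGo height rest + 1 else 0

def solution_alt (array : List Int) (height : Int) : Int :=
  solutionAltGo height array.reverse

-- ===== PRECONDITION & SPEC =====
def Spec_solution (array : List Int) (height : Int) (out : Int) : Prop := out = solution_alt array height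
instance (array : List Int) (height : Int) (out : Int) : Decidable (Spec_solution array height out) := by unfold Spec_solution; infer_instance

-- ===== CLAIM (what is proved, stated in full; the proofs are below) =====
def Claim_equal_solution : Prop := ∀ (array : List Int) (height : Int), Dom_solution array height → Spec_solution array height (solution array height)

-- ===== LEMMAS AND PROOFS =====
theorem solution_eq_alt (height : Int) (array : List Int) :
    solution array height = solution_alt array height := by
  induction array using List.reverseRecOn with
  | nil => rfl
  | append_singleton xs x ih =>
    simp [solution, solution_alt, solutionAltGo, List.foldl_append] at *
    split_ifs with h <;> simp [ih]

-- ===== VERDICT (by name: the statement is the Claim_ definition above) =====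
theorem solution_spec : Claim_equal_solution := by
  intro array height _
  unfold Spec_solution
  exact solution_eq_alt height array
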